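-- pv_equiv track=rewrite | github.com/dominionlandgroup-hub/Land-Dominator | backend/routers/upload.py | _buyer_type
-- ===== SOURCE A (Python) =====
-- _LLC_KEYWORDS = {
--     'LLC', 'CORP', 'INC', 'LTD', 'TRUST', 'PROPERTIES', 'HOLDINGS',
--     'INVESTMENT', 'DEVELOPMENT', 'VENTURES', 'REALTY', 'GROUP', 'PARTNERS',
--     'CAPITAL', 'ASSETS', 'ACQUISITIONS', 'LAND', 'REAL ESTATE',
-- }
--
-- def _buyer_type(buyer_name: str) -> str:
--     if not buyer_name:
--         return 'INDIVIDUAL'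
--     upper = buyer_name.upper()
--     for kw in _LLC_KEYWORDS:
--         if kw in upper:
--             return 'LLC'
--     return 'INDIVIDUAL'
-- ===== SOURCE B (Python) =====
-- _LLC_KEYWORDS = {
--     'LLC', 'CORP', 'INC', 'LTD', 'TRUST', 'PROPERTIES', 'HOLDINGS',
--     'INVESTMENT', 'DEVELOPMENT', 'VENTURES', 'REALTY', 'GROUP', 'PARTNERS',
--     'CAPITAL', 'ASSETS', 'ACQUISITIONS', 'LAND', 'REAL ESTATE',
-- }
--
-- _KW = tuple(_LLC_KEYWORDS)
--
--
-- def _buyer_type(buyer_name: str) -> str: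
--     # Single left-to-right scan: at each position, check whether some keyword
--     # starts there (like a combined-alternation pattern search), instead of
--     # one full substring search per keyword.
--     if not buyer_name:
--         return 'INDIVIDUAL'
--     upper = buyer_name.upper()
--     if any(upper.startswith(kw, i) for i in range(len(upper)) for kw in _KW):
--         return 'LLC'
--     return 'INDIVIDUAL'
-- ===== Notes on version B (the rewrite author's own statement) =====
-- stated objective: alternative
-- what changed: Replaced the per-keyword full substring search (one 'kw in upper' scan per keyword with early return) by a single left-to-right position scan that checks at each position whether any keyword starts there, as a combined alternation search would.
import Mathlib
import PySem

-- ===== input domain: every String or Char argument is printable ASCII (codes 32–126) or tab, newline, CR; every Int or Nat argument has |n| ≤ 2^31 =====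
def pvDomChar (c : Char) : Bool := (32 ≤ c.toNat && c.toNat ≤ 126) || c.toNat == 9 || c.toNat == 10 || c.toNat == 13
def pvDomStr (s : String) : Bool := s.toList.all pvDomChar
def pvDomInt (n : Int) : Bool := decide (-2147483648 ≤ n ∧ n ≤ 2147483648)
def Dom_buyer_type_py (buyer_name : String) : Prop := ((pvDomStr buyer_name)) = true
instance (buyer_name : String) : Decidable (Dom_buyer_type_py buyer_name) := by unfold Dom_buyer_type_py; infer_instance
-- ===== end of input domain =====

-- B replaces A's per-keyword substring searches by a single left-to-right
-- position scan checking whether any keyword starts at each position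
-- (objective: alternative; same result, same asymptotic cost).

-- The keyword set (A iterates a Python set; the result is order-independent,
-- so a fixed listing order is a faithful port).
def llcKeywords : List String :=
  ["LLC", "CORP", "INC", "LTD", "TRUST", "PROPERTIES", "HOLDINGS",
   "INVESTMENT", "DEVELOPMENT", "VENTURES", "REALTY", "GROUP", "PARTNERS",
   "CAPITAL", "ASSETS", "ACQUISITIONS", "LAND", "REAL ESTATE"]

-- ===== PORT A =====
-- the 'for kw in _LLC_KEYWORDS: if kw in upper: return "LLC"' loop
def buyerLoopA : List String → String → String
  | [], _ => "INDIVIDUAL"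
  | kw :: rest, upper =>
      if PySem.Str.isIn kw upper then "LLC" else buyerLoopA rest upper

def buyer_type_py (buyer_name : String) : String :=
  if buyer_name = "" then "INDIVIDUAL"
  else buyerLoopA llcKeywords (PySem.Str.upper buyer_name)

-- ===== PORT B =====
-- 'any(upper.startswith(kw, i) for i in range(len(upper)) for kw in _KW)':
-- scan the suffixes of the uppercased name; at each, test every keyword prefix
def buyerScanB : List Char → Bool
  | [] => false
  | c :: rest =>
      llcKeywords.any (fun kw => PySem.Chars.startswith (c :: rest) kw.toList)
        || buyerScanB rest

def buyer_type_py_alt (buyer_name : String) : String :=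
  if buyer_name = "" then "INDIVIDUAL"
  else if buyerScanB (PySem.Str.upper buyer_name).toList then "LLC"
  else "INDIVIDUAL"

-- ===== PRECONDITION & SPEC =====
def Spec_buyer_type_py (buyer_name : String) (out : String) : Prop := out = buyer_type_py_alt buyer_name
instance (buyer_name : String) (out : String) : Decidable (Spec_buyer_type_py buyer_name out) := by unfold Spec_buyer_type_py; infer_instance

-- ===== CLAIM (what is proved, stated in full; the proofs are below) =====
def Claim_equal_buyer_type_py : Prop := ∀ (buyer_name : String), Dom_buyer_type_py buyer_name → Spec_buyer_type_py buyer_name (buyer_type_py buyer_name)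

-- ===== LEMMAS AND PROOFS =====

-- no keyword is empty
theorem llcKeywords_ne_nil : ∀ kw ∈ llcKeywords, kw.toList ≠ [] := by decide

-- A's loop returns "LLC" exactly when some keyword is a substring
theorem buyerLoopA_eq (kws : List String) (upper : String) :
    buyerLoopA kws upper =
      (if kws.any (fun kw => PySem.Str.isIn kw upper) then "LLC" else "INDIVIDUAL") := by
  induction kws with
  | nil => simp [buyerLoopA]
  | cons kw rest ih =>
      by_cases h : PySem.Chars.isIn kw.toList upper.toList = true
      · simp [buyerLoopA, h]
      · simp [buyerLoopA, h, ih]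

-- B's scan finds a keyword iff some keyword is an infix of the char list
theorem buyerScanB_iff (l : List Char) :
    buyerScanB l = true ↔ ∃ kw ∈ llcKeywords, kw.toList <:+: l := by
  induction l with
  | nil =>
      simp only [buyerScanB]
      constructor
      · intro h; exact absurd h (by simp)
      · rintro ⟨kw, hmem, hinf⟩
        exact absurd (List.eq_nil_of_infix_nil hinf) (llcKeywords_ne_nil kw hmem)
  | cons c rest ih =>
      simp only [buyerScanB, Bool.or_eq_true, List.any_eq_true,
        PySem.Chars.startswith_iff, ih]
      constructor
      · rintro (⟨kw, hmem, hpre⟩ | ⟨kw, hmem, hinf⟩)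
        · exact ⟨kw, hmem, hpre.isInfix⟩
        · exact ⟨kw, hmem, hinf.trans (List.infix_cons_iff.mpr (Or.inr List.infix_rfl))⟩
      · rintro ⟨kw, hmem, hinf⟩
        rcases List.infix_cons_iff.mp hinf with hpre | hinf'
        · exact Or.inl ⟨kw, hmem, hpre⟩
        · exact Or.inr ⟨kw, hmem, hinf'⟩

-- ===== VERDICT (by name: the statement is the Claim_ definition above) =====
theorem buyer_type_py_spec : Claim_equal_buyer_type_py := by
  intro s _
  unfold Spec_buyer_type_py buyer_type_py buyer_type_py_alt
  by_cases hs : s = ""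
  · simp [hs]
  · simp only [hs, if_false]
    have key : (llcKeywords.any fun kw => PySem.Str.isIn kw (PySem.Str.upper s))
        = buyerScanB (PySem.Str.upper s).toList := by
      rw [Bool.eq_iff_iff, List.any_eq_true, buyerScanB_iff]
      exact exists_congr fun kw => and_congr_right fun _ =>
        PySem.Str.isIn_iff_infix _ _
    rw [buyerLoopA_eq, key]
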